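-- pv_equiv track=rewrite | github.com/Modak-Rosogulla/ChatDB | app/sql_query_preprocessor.py | prioritize_by_query_context
-- ===== SOURCE A (Python) =====
-- def prioritize_by_query_context(tokens, matched_metadata):
--     """
--     Prioritize tables based on the order of tokens in the user query.
--
--     Args:
--         tokens (list): List of tokens from the user query.
--         matched_metadata (dict): Matched tables and columns.
--
--     Returns:
--         dict: Updated metadata prioritizing tables by query context.
--     """
--     resolved_metadata = {}
--     for token in tokens:
--         for table, columns in matched_metadata.items():
--             if token in columns or token == table:
--                 if table not in resolved_metadata:
--                     resolved_metadata[table] = []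
--                 if token in columns and token not in resolved_metadata[table]:
--                     resolved_metadata[table].append(token)
--     return resolved_metadata
-- ===== SOURCE B (Python) =====
-- def prioritize_by_query_context(tokens, matched_metadata):
--     """
--     Prioritize tables based on the order of tokens in the user query.
--
--     Inverted-index version: one pass over the metadata builds, for every
--     name that can match, the list of (table, is_column) hits in metadata
--     order; then each query token is a single dict lookup.
--     """
--     hits = {}
--     for table, columns in matched_metadata.items():
--         seen = set()
--         for col in columns:
--             if col not in seen:
--                 seen.add(col)
--                 hits.setdefault(col, []).append((table, True))
--         if table not in seen:
--             hits.setdefault(table, []).append((table, False))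
--     resolved = {}
--     for token in tokens:
--         for table, is_col in hits.get(token, ()):
--             if table not in resolved:
--                 resolved[table] = []
--             if is_col and token not in resolved[table]:
--                 resolved[table].append(token)
--     return resolved
-- ===== Notes on version B (the rewrite author's own statement) =====
-- stated objective: faster
-- what changed: Replaced the nested scan of all tables/columns per query token by a one-pass inverted index mapping each column/table name to its ordered (table, is_column) hits, so each token becomes a single dict lookup.
import Mathlib
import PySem

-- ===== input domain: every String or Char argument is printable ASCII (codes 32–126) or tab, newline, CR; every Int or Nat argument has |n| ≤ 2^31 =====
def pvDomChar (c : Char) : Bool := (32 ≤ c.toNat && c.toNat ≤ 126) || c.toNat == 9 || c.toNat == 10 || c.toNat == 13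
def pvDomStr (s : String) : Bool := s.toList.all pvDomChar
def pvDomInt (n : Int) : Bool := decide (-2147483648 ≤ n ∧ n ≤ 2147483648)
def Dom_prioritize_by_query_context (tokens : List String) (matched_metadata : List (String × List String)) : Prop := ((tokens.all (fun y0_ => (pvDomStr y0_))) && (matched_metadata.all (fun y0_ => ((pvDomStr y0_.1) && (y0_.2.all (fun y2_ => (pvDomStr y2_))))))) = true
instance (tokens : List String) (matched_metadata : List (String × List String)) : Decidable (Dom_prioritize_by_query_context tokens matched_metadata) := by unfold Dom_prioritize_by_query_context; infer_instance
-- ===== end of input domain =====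

-- B replaces A's per-token scan of every table's column list by an inverted index built once; proved to return exactly A's dict.

-- ===== PORT A =====
def prioritize_by_query_context (tokens : List String) (matched_metadata : List (String × List String)) : List (String × List String) :=
  (tokens.foldl (fun resolved token =>
    matched_metadata.foldl (fun resolved tc =>
      let table := tc.1
      let columns := tc.2
      if columns.contains token || token == table then
        -- if table not in resolved_metadata: resolved_metadata[table] = []
        let resolved := if resolved.contains table then resolved else resolved.insert table []
        -- if token in columns and token not in resolved_metadata[table]: resolved_metadata[table].append(token)
        if columns.contains token && !((resolved.getD table []).contains token) then
          resolved.insert table ((resolved.getD table []) ++ [token])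
        else resolved
      else resolved) resolved)
    (PySem.Dict.empty : PySem.Dict String (List String))).items

-- ===== PORT B =====
-- hits.setdefault(col, []).append(p) is ported as insert of (getD ++ [p]) (same dict: overwrite keeps position).
def pvBuildHits (matched_metadata : List (String × List String)) : PySem.Dict String (List (String × Bool)) :=
  matched_metadata.foldl (fun hits tc =>
    let table := tc.1
    let st := tc.2.foldl
      (fun (st : PySem.Set String × PySem.Dict String (List (String × Bool))) col =>
        if PySem.Set.contains st.1 col then st
        else (PySem.Set.add st.1 col, st.2.insert col ((st.2.getD col []) ++ [(table, true)])))
      ((PySem.Set.empty : PySem.Set String), hits)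
    if PySem.Set.contains st.1 table then st.2
    else st.2.insert table ((st.2.getD table []) ++ [(table, false)])) PySem.Dict.empty

def prioritize_by_query_context_alt (tokens : List String) (matched_metadata : List (String × List String)) : List (String × List String) :=
  let hits := pvBuildHits matched_metadata
  (tokens.foldl (fun resolved token =>
    (hits.getD token []).foldl (fun resolved tb =>
      let table := tb.1
      let resolved := if resolved.contains table then resolved else resolved.insert table []
      if tb.2 && !((resolved.getD table []).contains token) then
        resolved.insert table ((resolved.getD table []) ++ [token])
      else resolved) resolved)
    (PySem.Dict.empty : PySem.Dict String (List String))).items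

-- ===== PRECONDITION & SPEC =====
def Spec_prioritize_by_query_context (tokens : List String) (matched_metadata : List (String × List String)) (out : List (String × List String)) : Prop := out = prioritize_by_query_context_alt tokens matched_metadata
instance (tokens : List String) (matched_metadata : List (String × List String)) (out : List (String × List String)) : Decidable (Spec_prioritize_by_query_context tokens matched_metadata out) := by unfold Spec_prioritize_by_query_context; infer_instance

-- ===== CLAIM (what is proved, stated in full; the proofs are below) =====
def Claim_equal_prioritize_by_query_context : Prop := ∀ (tokens : List String) (matched_metadata : List (String × List String)), Dom_prioritize_by_query_context tokens matched_metadata → Spec_prioritize_by_query_context tokens matched_metadata (prioritize_by_query_context tokens matched_metadata)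

-- ===== LEMMAS AND PROOFS =====

-- The (table, is_column) hit a single metadata pair contributes for a given token (empty if no match).
def pvEntry (token : String) (tc : String × List String) : List (String × Bool) :=
  if tc.2.contains token || token == tc.1 then [(tc.1, tc.2.contains token)] else []

-- B's inner per-hit step on the resolved dict.
def pvStepR (token : String) (resolved : PySem.Dict String (List String)) (tb : String × Bool) : PySem.Dict String (List String) :=
  let table := tb.1
  let resolved := if resolved.contains table then resolved else resolved.insert table []
  if tb.2 && !((resolved.getD table []).contains token) then
    resolved.insert table ((resolved.getD table []) ++ [token])
  else resolved

-- A's per-pair step equals folding B's step over the pair's (at most one) hit entry.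
theorem pvStepA_eq_foldR (token : String) (r : PySem.Dict String (List String)) (tc : String × List String) :
    (if tc.2.contains token || token == tc.1 then
        if tc.2.contains token && !(((if r.contains tc.1 then r else r.insert tc.1 []).getD tc.1 []).contains token) then
          (if r.contains tc.1 then r else r.insert tc.1 []).insert tc.1
            (((if r.contains tc.1 then r else r.insert tc.1 []).getD tc.1 []) ++ [token])
        else (if r.contains tc.1 then r else r.insert tc.1 [])
      else r) = (pvEntry token tc).foldl (pvStepR token) r := by
  unfold pvEntry pvStepR
  by_cases h2 : token ∈ tc.2 <;> by_cases h1 : token = tc.1 <;>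
    simp [h2, h1, List.foldl_cons, List.foldl_nil]

-- A's whole inner scan over the metadata equals folding B's step over all hit entries in order.
theorem pvInnerA_eq (token : String) (mm : List (String × List String)) (r : PySem.Dict String (List String)) :
    mm.foldl (fun resolved tc =>
      if tc.2.contains token || token == tc.1 then
        if tc.2.contains token && !(((if resolved.contains tc.1 then resolved else resolved.insert tc.1 []).getD tc.1 []).contains token) then
          (if resolved.contains tc.1 then resolved else resolved.insert tc.1 []).insert tc.1
            (((if resolved.contains tc.1 then resolved else resolved.insert tc.1 []).getD tc.1 []) ++ [token])
        else (if resolved.contains tc.1 then resolved else resolved.insert tc.1 [])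
      else resolved) r
    = (mm.flatMap (pvEntry token)).foldl (pvStepR token) r := by
  induction mm generalizing r with
  | nil => rfl
  | cons tc rest ih =>
      simp only [List.foldl_cons, List.flatMap_cons, List.foldl_append]
      rw [← pvStepA_eq_foldR token r tc, ih]

-- The seen-set loop over one pair's column list: the seen set collects the columns, and the
-- token's bucket gains one (table, true) iff token is a not-yet-seen column.
theorem pvColsLoop (token table : String) (cs : List String) (seen : PySem.Set String)
    (hits : PySem.Dict String (List (String × Bool))) :
    (∀ x, x ∈ (cs.foldl (fun (st : PySem.Set String × PySem.Dict String (List (String × Bool))) col =>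
        if PySem.Set.contains st.1 col then st
        else (PySem.Set.add st.1 col, st.2.insert col ((st.2.getD col []) ++ [(table, true)]))) (seen, hits)).1
      ↔ x ∈ seen ∨ x ∈ cs)
    ∧ (cs.foldl (fun (st : PySem.Set String × PySem.Dict String (List (String × Bool))) col =>
        if PySem.Set.contains st.1 col then st
        else (PySem.Set.add st.1 col, st.2.insert col ((st.2.getD col []) ++ [(table, true)]))) (seen, hits)).2.getD token []
      = hits.getD token [] ++ (if token ∈ cs ∧ token ∉ seen then [(table, true)] else []) := by
  induction cs generalizing seen hits with
  | nil => simp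
  | cons c rest ih =>
      simp only [List.foldl_cons]
      by_cases hc : PySem.Set.contains seen c = true
      · have hmem : c ∈ seen := by
          simpa [PySem.Set.contains] using hc
        rw [if_pos hc]
        obtain ⟨ih1, ih2⟩ := ih seen hits
        refine ⟨fun x => ?_, ?_⟩
        · rw [ih1]
          constructor
          · rintro (hx | hx)
            · exact Or.inl hx
            · exact Or.inr (List.mem_cons_of_mem _ hx)
          · rintro (hx | hx)
            · exact Or.inl hx
            · rcases List.mem_cons.1 hx with hx | hx
              · subst hx; exact Or.inl hmem
              · exact Or.inr hx
        · rw [ih2]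
          by_cases htc : token = c
          · subst htc; simp [hmem]
          · simp [List.mem_cons, htc]
      · have hmem : c ∉ seen := by
          intro hx
          exact hc (by simpa [PySem.Set.contains] using hx)
        rw [if_neg hc]
        obtain ⟨ih1, ih2⟩ := ih (PySem.Set.add seen c) (hits.insert c ((hits.getD c []) ++ [(table, true)]))
        refine ⟨fun x => ?_, ?_⟩
        · rw [ih1, PySem.Set.mem_add]
          constructor
          · rintro ((hx | hx) | hx)
            · exact Or.inl hx
            · exact Or.inr (by simp [hx])
            · exact Or.inr (List.mem_cons_of_mem _ hx)
          · rintro (hx | hx)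
            · exact Or.inl (Or.inl hx)
            · rcases List.mem_cons.1 hx with hx | hx
              · exact Or.inl (Or.inr hx)
              · exact Or.inr hx
        · rw [ih2, PySem.Dict.getD_insert]
          by_cases htc : token = c
          · subst htc
            simp [hmem]
          · simp [htc, PySem.Set.mem_add, List.mem_cons]

-- Inverted-index characterisation: looking the token up in B's hits dict yields exactly the
-- hit entries of all metadata pairs, in metadata order.
theorem pvBuildHits_getD (token : String) (mm : List (String × List String)) :
    (pvBuildHits mm).getD token [] = mm.flatMap (pvEntry token) := by
  unfold pvBuildHits
  suffices h : ∀ (hits : PySem.Dict String (List (String × Bool))),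
      (mm.foldl (fun hits tc =>
        let st := tc.2.foldl
          (fun (st : PySem.Set String × PySem.Dict String (List (String × Bool))) col =>
            if PySem.Set.contains st.1 col then st
            else (PySem.Set.add st.1 col, st.2.insert col ((st.2.getD col []) ++ [(tc.1, true)])))
          ((PySem.Set.empty : PySem.Set String), hits)
        if PySem.Set.contains st.1 tc.1 then st.2
        else st.2.insert tc.1 ((st.2.getD tc.1 []) ++ [(tc.1, false)])) hits).getD token []
      = hits.getD token [] ++ mm.flatMap (pvEntry token) by
    simpa using h PySem.Dict.empty
  induction mm with
  | nil => intro hits; simp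
  | cons tc rest ih =>
      intro hits
      simp only [List.foldl_cons, List.flatMap_cons]
      obtain ⟨h1, h2⟩ := pvColsLoop token tc.1 tc.2 PySem.Set.empty hits
      set F := tc.2.foldl
          (fun (st : PySem.Set String × PySem.Dict String (List (String × Bool))) col =>
            if PySem.Set.contains st.1 col then st
            else (PySem.Set.add st.1 col, st.2.insert col ((st.2.getD col []) ++ [(tc.1, true)])))
          ((PySem.Set.empty : PySem.Set String), hits) with hF
      have hmemF : ∀ x, x ∈ F.1 ↔ x ∈ tc.2 := by
        intro x
        rw [h1]
        simp [PySem.Set.empty]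
      by_cases ht : PySem.Set.contains F.1 tc.1 = true
      · have htm : tc.1 ∈ tc.2 :=
          (hmemF tc.1).1 (by simpa [PySem.Set.contains] using ht)
        rw [if_pos ht, ih, h2]
        have hentry : pvEntry token tc
            = (if token ∈ tc.2 ∧ token ∉ (PySem.Set.empty : PySem.Set String) then [(tc.1, true)] else []) := by
          unfold pvEntry
          by_cases htok : token ∈ tc.2
          · simp [htok, PySem.Set.empty]
          · by_cases hte : token = tc.1
            · subst hte; exact absurd htm htok
            · simp [htok, hte, PySem.Set.empty]
        rw [hentry, List.append_assoc]
      · have htm : tc.1 ∉ tc.2 := by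
          intro hx
          exact ht (by simpa [PySem.Set.contains] using (hmemF tc.1).2 hx)
        rw [if_neg ht, ih, PySem.Dict.getD_insert, h2]
        by_cases hte : token = tc.1
        · subst hte
          have hentry : pvEntry tc.1 tc = [(tc.1, false)] := by
            unfold pvEntry
            simp [htm]
          simp [hentry, htm, h2]
        · rw [if_neg hte]
          have hentry : pvEntry token tc
              = (if token ∈ tc.2 ∧ token ∉ (PySem.Set.empty : PySem.Set String) then [(tc.1, true)] else []) := by
            unfold pvEntry
            by_cases htok : token ∈ tc.2
            · simp [htok, PySem.Set.empty]
            · simp [htok, hte, PySem.Set.empty]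
          rw [hentry, List.append_assoc]

-- ===== VERDICT (by name: the statement is the Claim_ definition above) =====
theorem prioritize_by_query_context_spec : Claim_equal_prioritize_by_query_context := by
  intro tokens mm _
  unfold Spec_prioritize_by_query_context
  have hA : prioritize_by_query_context tokens mm
      = (tokens.foldl (fun resolved token =>
          mm.foldl (fun resolved tc =>
            if tc.2.contains token || token == tc.1 then
              if tc.2.contains token && !(((if resolved.contains tc.1 then resolved else resolved.insert tc.1 []).getD tc.1 []).contains token) then
                (if resolved.contains tc.1 then resolved else resolved.insert tc.1 []).insert tc.1
                  (((if resolved.contains tc.1 then resolved else resolved.insert tc.1 []).getD tc.1 []) ++ [token])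
              else (if resolved.contains tc.1 then resolved else resolved.insert tc.1 [])
            else resolved) resolved)
          (PySem.Dict.empty : PySem.Dict String (List String))).items := rfl
  have hB : prioritize_by_query_context_alt tokens mm
      = (tokens.foldl (fun resolved token =>
          ((pvBuildHits mm).getD token []).foldl (pvStepR token) resolved)
          (PySem.Dict.empty : PySem.Dict String (List String))).items := rfl
  rw [hA, hB]
  have hfun : (fun (resolved : PySem.Dict String (List String)) (token : String) =>
        mm.foldl (fun resolved tc =>
          if tc.2.contains token || token == tc.1 then
            if tc.2.contains token && !(((if resolved.contains tc.1 then resolved else resolved.insert tc.1 []).getD tc.1 []).contains token) then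
              (if resolved.contains tc.1 then resolved else resolved.insert tc.1 []).insert tc.1
                (((if resolved.contains tc.1 then resolved else resolved.insert tc.1 []).getD tc.1 []) ++ [token])
            else (if resolved.contains tc.1 then resolved else resolved.insert tc.1 [])
          else resolved) resolved)
      = (fun (resolved : PySem.Dict String (List String)) (token : String) =>
        ((pvBuildHits mm).getD token []).foldl (pvStepR token) resolved) := by
    funext resolved token
    rw [pvInnerA_eq, ← pvBuildHits_getD]
  rw [hfun]
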